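-- pv_equiv track=rewrite | github.com/alexandraback/datacollection | solutions_5636311922769920_0/Python/Nepeta/fractiles.py | generate
-- ===== SOURCE A (Python) =====
-- def generate(x, size, depth, remaining_factors=None):
--     if remaining_factors is None:
--         remaining_factors = list(range(0, size))
--
--     if depth == 0:
--         yield x
--     else:
--         for factor in remaining_factors:
--             for ret in generate(x * size + factor, size, depth - 1, [x for x in remaining_factors if x != factor]):
--                 yield ret
-- ===== SOURCE B (Python) =====
-- def generate(x, size, depth, remaining_factors=None):
--     if remaining_factors is None:
--         remaining_factors = list(range(0, size))
--     if depth < 0: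
--         return
--     level = [(x, remaining_factors)]
--     for _ in range(depth):
--         if not level:
--             break
--         level = [(v * size + f, [y for y in rem if y != f])
--                  for (v, rem) in level for f in rem]
--     for v, _ in level:
--         yield v
-- ===== Notes on version B (the rewrite author's own statement) =====
-- stated objective: alternative
-- what changed: Replaces the depth-first recursive generator with an iterative breadth-first level expansion: a worklist of (value, remaining) states is expanded one depth level at a time by a single comprehension, then the final level's values are yielded.
import Mathlib
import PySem

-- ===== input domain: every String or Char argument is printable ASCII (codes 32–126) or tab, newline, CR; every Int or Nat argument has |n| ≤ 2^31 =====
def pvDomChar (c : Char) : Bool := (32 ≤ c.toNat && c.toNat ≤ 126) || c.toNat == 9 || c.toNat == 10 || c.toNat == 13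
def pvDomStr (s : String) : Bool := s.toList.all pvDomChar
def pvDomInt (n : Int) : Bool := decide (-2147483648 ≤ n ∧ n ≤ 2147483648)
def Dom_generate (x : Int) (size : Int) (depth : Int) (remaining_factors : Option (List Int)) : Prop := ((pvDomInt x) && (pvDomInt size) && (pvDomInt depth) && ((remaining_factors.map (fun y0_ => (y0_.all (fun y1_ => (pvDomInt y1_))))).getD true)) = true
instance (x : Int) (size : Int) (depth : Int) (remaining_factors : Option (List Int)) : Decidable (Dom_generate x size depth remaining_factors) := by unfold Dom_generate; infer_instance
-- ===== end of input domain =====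

-- B replaces A's depth-first recursion with an iterative breadth-first level expansion (alternative; not claimed faster).

-- ===== PORT A =====
-- termination lemma for genA's recursion: the value-filtered list is strictly shorter
theorem pv_filter_lt (rem : List Int) (f : Int) (hf : f ∈ rem) :
    (rem.filter (fun y => y != f)).length < rem.length := by
  apply List.length_filter_lt_length_iff_exists.mpr
  exact ⟨f, hf, by simp⟩

-- recursive core of A (the Python function after the None-default is resolved)
def genA (x : Int) (size : Int) (depth : Int) (rem : List Int) : List Int :=
  if depth = 0 then [x]
  else rem.attach.flatMap (fun f =>
    genA (x * size + f.1) size (depth - 1) (rem.filter (fun y => y != f.1)))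
termination_by rem.length
decreasing_by simpa using pv_filter_lt rem f.1 f.2

def generate (x : Int) (size : Int) (depth : Int) (remaining_factors : Option (List Int)) : List Int :=
  let rem := match remaining_factors with
    | none => PySem.List.pyRange 0 size 1
    | some l => l
  genA x size depth rem

-- ===== PORT B =====
-- one level of breadth-first expansion (the comprehension in Source B)
def stepB (size : Int) (level : List (Int × List Int)) : List (Int × List Int) :=
  level.flatMap (fun p => p.2.map (fun f => (p.1 * size + f, p.2.filter (fun y => y != f))))

-- the `for _ in range(depth)` loop with its early `break` on an empty level
def loopB (size : Int) : Nat → List (Int × List Int) → List (Int × List Int)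
  | 0, level => level
  | d + 1, level => if level = [] then level else loopB size d (stepB size level)

def generate_alt (x : Int) (size : Int) (depth : Int) (remaining_factors : Option (List Int)) : List Int :=
  let rem := match remaining_factors with
    | none => PySem.List.pyRange 0 size 1
    | some l => l
  if depth < 0 then []
  else (loopB size depth.toNat [(x, rem)]).map Prod.fst

-- ===== PRECONDITION & SPEC =====
def Spec_generate (x : Int) (size : Int) (depth : Int) (remaining_factors : Option (List Int)) (out : List Int) : Prop := out = generate_alt x size depth remaining_factors
instance (x : Int) (size : Int) (depth : Int) (remaining_factors : Option (List Int)) (out : List Int) : Decidable (Spec_generate x size depth remaining_factors out) := by unfold Spec_generate; infer_instance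

-- ===== CLAIM (what is proved, stated in full; the proofs are below) =====
def Claim_equal_generate : Prop := ∀ (x : Int) (size : Int) (depth : Int) (remaining_factors : Option (List Int)), Dom_generate x size depth remaining_factors → Spec_generate x size depth remaining_factors (generate x size depth remaining_factors)

-- ===== LEMMAS AND PROOFS =====
theorem genA_zero (x size : Int) (rem : List Int) : genA x size 0 rem = [x] := by
  rw [genA]; simp

theorem genA_neg (n : Nat) : ∀ (rem : List Int) (x size d : Int),
    rem.length ≤ n → d < 0 → genA x size d rem = [] := by
  induction n with
  | zero =>
    intro rem x size d hlen hd
    have : rem = [] := List.eq_nil_of_length_eq_zero (Nat.le_zero.mp hlen)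
    subst this
    rw [genA]
    simp [show ¬ d = 0 by omega]
  | succ n ih =>
    intro rem x size d hlen hd
    rw [genA, if_neg (by omega)]
    apply List.flatMap_eq_nil_iff.mpr
    intro f hf
    apply ih
    · have := pv_filter_lt rem f.1 f.2
      omega
    · omega

theorem loopB_eq (size : Int) (d : Nat) : ∀ (L : List (Int × List Int)),
    (loopB size d L).map Prod.fst = L.flatMap (fun p => genA p.1 size (d : Int) p.2) := by
  induction d with
  | zero =>
    intro L
    simp only [loopB, Nat.cast_zero, genA_zero]
    exact List.map_eq_flatMap
  | succ d ih =>
    intro L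
    by_cases hL : L = []
    · subst hL; simp [loopB]
    · rw [loopB, if_neg hL, ih]
      unfold stepB
      rw [List.flatMap_assoc]
      apply List.flatMap_congr
      intro p _
      rw [List.flatMap_map]
      rw [genA, if_neg (by push_cast; omega)]
      simp only [List.flatMap_subtype, List.unattach_attach]
      apply List.flatMap_congr
      intro f _
      congr 1
      push_cast
      ring

-- ===== VERDICT (by name: the statement is the Claim_ definition above) =====
theorem generate_spec : Claim_equal_generate := by
  intro x size depth rf _dom
  unfold Spec_generate generate generate_alt
  by_cases h : depth < 0
  · simp only [if_pos h]
    exact genA_neg _ _ _ _ _ le_rfl h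
  · simp only [if_neg h]
    rw [loopB_eq]
    simp only [List.flatMap_cons, List.flatMap_nil, List.append_nil]
    rw [Int.toNat_of_nonneg (by omega)]
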